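-- pv_equiv track=rewrite | github.com/yeonssu/Algorithm | 프로그래머스/기능개발.py | solution
-- ===== SOURCE A (Python) =====
-- def solution(progresses, speeds):
--     day = []
--     for i in range(len(progresses)):
--         if (100 - progresses[i]) % speeds[i] == 0:
--             rest_day = (100 - progresses[i])//speeds[i]
--         else:
--             rest_day = (100 - progresses[i])//speeds[i] + 1
--         day.append(rest_day)
--
--     result_day = []
--     result_day.append(day[0])
--     a = 0
--     for i in range(1,len(day)):
--         if result_day[a] > day[i]:
--             result_day.append(result_day[a])
--         else:
--             result_day.append(day[i])
--         a += 1
--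
--     answer = []
--     for i in range(len(result_day)):
--         cnt = result_day.count(result_day[i])
--         if cnt not in answer:
--             answer.append(cnt)
--
--     return answer
-- ===== SOURCE B (Python) =====
-- def solution(progresses, speeds):
--     # One pass over contiguous runs of the running-max day sequence; O(n).
--     answer = []
--     seen = set()
--     cur = None
--     run = 0
--     for p, s in zip(progresses, speeds):
--         d = -((p - 100) // s)  # ceil((100 - p) / s)
--         if cur is None or d > cur:
--             if run and run not in seen:
--                 seen.add(run)
--                 answer.append(run)
--             cur = d
--             run = 1
--         else:
--             run += 1
--     if run and run not in seen:
--         seen.add(run)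
--         answer.append(run)
--     return answer
-- ===== Notes on version B (the rewrite author's own statement) =====
-- stated objective: faster
-- what changed: A makes three passes (per-index ceil days, a running-max list rebuilt by index, then for every position a full list.count plus a membership scan to dedup); B is a single pass over the zipped input that tracks the current run of the running maximum, emitting each completed run length once, deduplicated with a set.
import Mathlib
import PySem

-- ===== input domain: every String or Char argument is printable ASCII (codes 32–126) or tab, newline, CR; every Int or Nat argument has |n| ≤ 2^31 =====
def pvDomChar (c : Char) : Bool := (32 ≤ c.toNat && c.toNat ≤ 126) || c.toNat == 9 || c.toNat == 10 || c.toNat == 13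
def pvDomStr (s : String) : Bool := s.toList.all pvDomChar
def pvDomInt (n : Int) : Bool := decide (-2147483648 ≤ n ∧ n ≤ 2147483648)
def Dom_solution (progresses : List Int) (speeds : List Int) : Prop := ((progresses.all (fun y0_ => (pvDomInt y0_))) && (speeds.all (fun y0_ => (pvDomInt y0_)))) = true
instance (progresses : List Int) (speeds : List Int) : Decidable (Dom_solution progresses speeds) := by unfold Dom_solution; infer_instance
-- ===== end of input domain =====

-- B replaces A's three passes (per-index ceil days, running-max list rebuilt by index, then an
-- O(n^2) count+membership dedup) by a single O(n) pass over the contiguous runs of the running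
-- maximum, collecting run lengths and deduplicating them with a set (objective: faster).

-- ===== PORT A =====
def solution (progresses : List Int) (speeds : List Int) : List Int :=
  let day : List Int :=
    (PySem.List.pyRange 0 (PySem.List.len progresses) 1).foldl
      (fun day i =>
        let rest_day : Int :=
          if PySem.Int.mod (100 - PySem.List.pyGetD progresses i 0) (PySem.List.pyGetD speeds i 0) = 0 then
            PySem.Int.floordiv (100 - PySem.List.pyGetD progresses i 0) (PySem.List.pyGetD speeds i 0)
          else
            PySem.Int.floordiv (100 - PySem.List.pyGetD progresses i 0) (PySem.List.pyGetD speeds i 0) + 1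
        day ++ [rest_day]) []
  let st :=
    (PySem.List.pyRange 1 (PySem.List.len day) 1).foldl
      (fun (st : List Int × Int) i =>
        let result_day := st.1
        let a := st.2
        let result_day :=
          if PySem.List.pyGetD result_day a 0 > PySem.List.pyGetD day i 0 then
            result_day ++ [PySem.List.pyGetD result_day a 0]
          else
            result_day ++ [PySem.List.pyGetD day i 0]
        (result_day, a + 1))
      ([PySem.List.pyGetD day 0 0], 0)
  let result_day := st.1
  (PySem.List.pyRange 0 (PySem.List.len result_day) 1).foldl
    (fun answer i =>
      let cnt : Int := (PySem.List.count result_day (PySem.List.pyGetD result_day i 0) : Int)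
      if answer.contains cnt then answer else answer ++ [cnt]) []

-- ===== PORT B =====
-- Source B's repeated 'if run and run not in seen: seen.add(run); answer.append(run)' block
def flushRun (answer : List Int) (seen : PySem.Set Int) (run : Int) : List Int × PySem.Set Int :=
  if run ≠ 0 ∧ PySem.Set.contains seen run = false then (answer ++ [run], PySem.Set.add seen run)
  else (answer, seen)

-- Source B's loop body, on the day value d of the current (p, s) pair
def bStep (st : (List Int × PySem.Set Int) × Option Int × Int) (d : Int) :
    (List Int × PySem.Set Int) × Option Int × Int :=
  let newRun : Bool := match st.2.1 with
    | none => true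
    | some c => decide (c < d)
  if newRun then (flushRun st.1.1 st.1.2 st.2.2, some d, 1)
  else (st.1, st.2.1, st.2.2 + 1)

def solution_alt (progresses : List Int) (speeds : List Int) : List Int :=
  let st :=
    (progresses.zip speeds).foldl
      (fun st pr => bStep st (-(PySem.Int.floordiv (pr.1 - 100) pr.2)))
      (([], PySem.Set.empty), none, 0)
  (flushRun st.1.1 st.1.2 st.2.2).1

-- ===== PRECONDITION & SPEC =====
-- Pre_ excludes exactly the inputs on which the Python A raises: empty progresses (IndexError on
-- day[0]), speeds shorter than progresses (IndexError), or a zero among the speeds actually used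
-- (ZeroDivisionError).
def Pre_solution (progresses : List Int) (speeds : List Int) : Prop :=
  progresses ≠ [] ∧ progresses.length ≤ speeds.length ∧
    ∀ s ∈ speeds.take progresses.length, s ≠ 0
instance (progresses : List Int) (speeds : List Int) : Decidable (Pre_solution progresses speeds) := by
  unfold Pre_solution; infer_instance

def pvWitness_solution : List Int × List Int := ([30, 95, 40], [5, 10, 99])

def Spec_solution (progresses : List Int) (speeds : List Int) (out : List Int) : Prop := out = solution_alt progresses speeds
instance (progresses : List Int) (speeds : List Int) (out : List Int) : Decidable (Spec_solution progresses speeds out) := by unfold Spec_solution; infer_instance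

-- ===== CLAIM (what is proved, stated in full; the proofs are below) =====
def Claim_equal_solution : Prop := ∀ (progresses : List Int) (speeds : List Int), Dom_solution progresses speeds → Pre_solution progresses speeds → Spec_solution progresses speeds (solution progresses speeds)

-- ===== LEMMAS AND PROOFS =====

-- the common day value: ceil((100-p)/s), as B computes it
def ceilDay (pr : Int × Int) : Int := -(PySem.Int.floordiv (pr.1 - 100) pr.2)

-- run groups of the running maximum: (value, length) pairs
def grp (c : Int) (k : Nat) : List Int → List (Int × Nat)
  | [] => [(c, k)]
  | d :: ds => if c < d then (c, k) :: grp d 1 ds else grp c (k + 1) ds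

-- tail of A's running-max list
def tailMax (c : Int) : List Int → List Int
  | [] => []
  | d :: ds => (if c < d then d else c) :: tailMax (if c < d then d else c) ds

def flat (pairs : List (Int × Nat)) : List Int :=
  pairs.flatMap (fun p => List.replicate p.2 p.1)

-- one step of the ordered dedup A's third loop and B's flushes both perform
def dstep (ans : List Int) (x : Int) : List Int :=
  if ans.contains x then ans else ans ++ [x]

lemma pos_case (a s : Int) (h : 0 < s) :
    (if a % s = 0 then a / s else a / s + 1) = -((-a)/s) := by
  rw [Int.neg_ediv, Int.sign_eq_one_of_pos h]
  have hd : s ∣ a ↔ a % s = 0 := Int.dvd_iff_emod_eq_zero ..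
  split_ifs with h1 h2 h2 <;> omega
lemma ceil_eq (a s : Int) (hs : s ≠ 0) :
    (if PySem.Int.mod a s = 0 then PySem.Int.floordiv a s else PySem.Int.floordiv a s + 1)
      = -(PySem.Int.floordiv (-a) s) := by
  rcases lt_or_gt_of_ne hs with hneg | hpos
  · have h' : 0 < -s := by omega
    have e1 : PySem.Int.floordiv a s = PySem.Int.floordiv (-a) (-s) := by
      rw [PySem.Int.floordiv_neg_neg]
    have e2 : PySem.Int.floordiv (-a) s = PySem.Int.floordiv a (-s) := by
      rw [← PySem.Int.floordiv_neg_neg a (-s)]; simp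
    have e3 : PySem.Int.mod a s = -PySem.Int.mod (-a) (-s) := by
      rw [← PySem.Int.mod_neg_neg (-a) (-s)]; simp
    rw [e1, e2, e3, PySem.Int.floordiv_eq_ediv_of_pos h', PySem.Int.floordiv_eq_ediv_of_pos h',
      PySem.Int.mod_eq_emod_of_pos h']
    simp only [neg_eq_zero]
    have := pos_case (-a) (-s) h'
    simp only [neg_neg] at this
    omega
  · rw [PySem.Int.mod_eq_emod_of_pos hpos, PySem.Int.floordiv_eq_ediv_of_pos hpos,
      PySem.Int.floordiv_eq_ediv_of_pos hpos]
    exact pos_case a s hpos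

lemma dayA_eq (ps ss : List Int) (hle : ps.length ≤ ss.length)
    (hs : ∀ s ∈ ss.take ps.length, s ≠ 0) :
    (PySem.List.pyRange 0 (PySem.List.len ps) 1).foldl
      (fun day i =>
        let rest_day : Int :=
          if PySem.Int.mod (100 - PySem.List.pyGetD ps i 0) (PySem.List.pyGetD ss i 0) = 0 then
            PySem.Int.floordiv (100 - PySem.List.pyGetD ps i 0) (PySem.List.pyGetD ss i 0)
          else
            PySem.Int.floordiv (100 - PySem.List.pyGetD ps i 0) (PySem.List.pyGetD ss i 0) + 1
        day ++ [rest_day]) []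
    = (ps.zip ss).map ceilDay := by
  have h1 := PySem.List.foldl_append_singleton_eq_map
    (fun i : Int =>
      if PySem.Int.mod (100 - PySem.List.pyGetD ps i 0) (PySem.List.pyGetD ss i 0) = 0 then
        PySem.Int.floordiv (100 - PySem.List.pyGetD ps i 0) (PySem.List.pyGetD ss i 0)
      else
        PySem.Int.floordiv (100 - PySem.List.pyGetD ps i 0) (PySem.List.pyGetD ss i 0) + 1)
    (PySem.List.pyRange 0 (PySem.List.len ps) 1) []
  rw [h1]
  simp only [List.nil_append]
  apply List.ext_getElem
  · simp [PySem.List.length_pyRange_one, List.length_zip]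
    omega
  · intro k hk1 hk2
    have hkp : k < ps.length := by
      simpa [PySem.List.length_pyRange_one] using hk1
    have hks : k < ss.length := lt_of_lt_of_le hkp hle
    rw [List.getElem_map, List.getElem_map, PySem.List.getElem_pyRange_one, List.getElem_zip]
    have hps : PySem.List.pyGetD ps ((0:Int) + (k:Int)) 0 = ps[k] := by
      rw [PySem.List.pyGetD_eq_getElem ps 0 (by omega) (by exact_mod_cast by omega)]
      simp
    have hss : PySem.List.pyGetD ss ((0:Int) + (k:Int)) 0 = ss[k] := by
      rw [PySem.List.pyGetD_eq_getElem ss 0 (by omega) (by exact_mod_cast by omega)]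
      simp
    rw [hps, hss]
    have hnz : ss[k] ≠ 0 := by
      have ht : k < (List.take ps.length ss).length := by simp; omega
      have hm : (List.take ps.length ss)[k]'ht ∈ List.take ps.length ss := List.getElem_mem ..
      rw [List.getElem_take] at hm
      exact hs _ hm
    have := ceil_eq (100 - ps[k]) ss[k] hnz
    simpa [ceilDay, show -(100 - ps[k]) = ps[k] - 100 by ring] using this

lemma loop2_inv (ds : List Int) :
    ∀ (r : List Int) (c : Int) (hr : r ≠ []) (_ : r.getLast hr = c) (a : Int)
      (_ : a = (r.length : Int) - 1),
    (ds.foldl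
      (fun (st : List Int × Int) d =>
        let result_day := st.1
        let a := st.2
        let result_day :=
          if PySem.List.pyGetD result_day a 0 > d then
            result_day ++ [PySem.List.pyGetD result_day a 0]
          else
            result_day ++ [d]
        (result_day, a + 1)) (r, a)).1 = r ++ tailMax c ds := by
  induction ds with
  | nil => intro r c hr hl a ha; simp [tailMax]
  | cons d ds ih =>
    intro r c hr hl a ha
    have hlen : 0 < r.length := List.length_pos_iff.mpr hr
    have hget : PySem.List.pyGetD r a 0 = c := by
      rw [PySem.List.pyGetD_eq_getElem r 0 (by omega) (by omega)]
      rw [← hl, List.getLast_eq_getElem]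
      congr 1
      omega
    simp only [List.foldl_cons, hget]
    set w : Int := if c < d then d else c with hw
    have hbr : (if c > d then r ++ [c] else r ++ [d]) = r ++ [w] := by
      by_cases h : c < d
      · simp [hw, h]; omega
      · by_cases h2 : c > d
        · simp [hw, h, h2]
        · have h3 : c = d := by omega
          simp [hw, h3]
    rw [hbr]
    have hne : r ++ [w] ≠ [] := by simp
    have := ih (r ++ [w]) w hne (by simp) (a + 1) (by simp; omega)
    rw [this]
    simp [tailMax, hw]


lemma flat_grp (ds : List Int) : ∀ (c : Int) (k : Nat),
    List.replicate k c ++ tailMax c ds = flat (grp c k ds) := by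
  induction ds with
  | nil => intro c k; simp [tailMax, grp, flat]
  | cons d ds ih =>
    intro c k
    by_cases h : c < d
    · simp only [tailMax, grp, if_pos h, flat, List.flatMap_cons]
      have := ih d 1
      simp only [flat] at this
      rw [← this]
      simp
    · simp only [tailMax, grp, if_neg h]
      have := ih c (k + 1)
      rw [← this]
      rw [List.replicate_succ' ]
      simp

lemma grp_chain (ds : List Int) : ∀ (c : Int) (k : Nat), 1 ≤ k →
    (grp c k ds).Pairwise (fun p q => p.1 < q.1) ∧
    (∀ p ∈ grp c k ds, c ≤ p.1) ∧ (∀ p ∈ grp c k ds, 1 ≤ p.2) := by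
  induction ds with
  | nil => intro c k hk; simp [grp]; omega
  | cons d ds ih =>
    intro c k hk
    by_cases h : c < d
    · obtain ⟨h1, h2, h3⟩ := ih d 1 (le_refl 1)
      simp only [grp, if_pos h]
      refine ⟨List.pairwise_cons.mpr ⟨fun q hq => lt_of_lt_of_le h (h2 q hq), h1⟩, ?_, ?_⟩
      · intro p hp
        rcases List.mem_cons.mp hp with rfl | hp
        · exact le_refl _
        · exact le_trans (le_of_lt h) (h2 p hp)
      · intro p hp
        rcases List.mem_cons.mp hp with rfl | hp
        · exact hk
        · exact h3 p hp
    · obtain ⟨h1, h2, h3⟩ := ih c (k + 1) (by omega)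
      simp only [grp, if_neg h]
      exact ⟨h1, h2, h3⟩

lemma count_flat_zero (pairs : List (Int × Nat)) (x : Int)
    (hx : ∀ p ∈ pairs, x ≠ p.1) : (flat pairs).count x = 0 := by
  induction pairs with
  | nil => simp [flat]
  | cons p ps ih =>
    simp only [flat, List.flatMap_cons, List.count_append]
    rw [List.count_replicate]
    simp only [flat] at ih
    rw [ih (fun q hq => hx q (List.mem_cons_of_mem _ hq))]
    have := hx p (List.mem_cons_self ..)
    simp [beq_iff_eq]
    omega

lemma map_count_flat (pairs : List (Int × Nat))
    (hch : pairs.Pairwise (fun p q => p.1 < q.1)) :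
    (flat pairs).map (fun v => ((flat pairs).count v : Int))
      = pairs.flatMap (fun p => List.replicate p.2 ((p.2 : Nat) : Int)) := by
  have key : ∀ p ∈ pairs, (flat pairs).count p.1 = p.2 := by
    induction pairs with
    | nil => simp
    | cons q qs ih =>
      intro p hp
      rw [List.pairwise_cons] at hch
      rcases List.mem_cons.mp hp with rfl | hp
      · simp only [flat, List.flatMap_cons, List.count_append, List.count_replicate]
        have h0 : (flat qs).count p.1 = 0 :=
          count_flat_zero qs p.1 (fun r hr => ne_of_lt (hch.1 r hr))
        simp only [flat] at h0
        simp [h0]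
      · simp only [flat, List.flatMap_cons, List.count_append, List.count_replicate]
        have hne : (q.1 == p.1) = false := by
          simp only [beq_eq_false_iff_ne, ne_eq]
          exact ne_of_lt (hch.1 p hp)
        rw [hne]
        have := ih hch.2 p hp
        simp only [flat] at this
        simp [this]
  -- now the map equality
  rw [show (flat pairs).map (fun v => ((flat pairs).count v : Int))
      = pairs.flatMap (fun p => (List.replicate p.2 p.1).map (fun v => ((flat pairs).count v : Int)))
    from by rw [flat, List.map_flatMap]]
  have gen : ∀ (l : List (Int × Nat)), (∀ p ∈ l, (flat pairs).count p.1 = p.2) →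
      l.flatMap (fun p => (List.replicate p.2 p.1).map (fun v => ((flat pairs).count v : Int)))
        = l.flatMap (fun p => List.replicate p.2 ((p.2 : Nat) : Int)) := by
    intro l
    induction l with
    | nil => intro _; simp
    | cons q l ihl =>
      intro hall
      simp only [List.flatMap_cons]
      rw [ihl (fun p hp => hall p (List.mem_cons_of_mem _ hp))]
      congr 1
      rw [List.map_replicate]
      congr 1
      rw [hall q (List.mem_cons_self ..)]
  exact gen pairs key


lemma dstep_contains (ans : List Int) (x : Int) : (dstep ans x).contains x = true := by
  by_cases h : x ∈ ans <;> simp [dstep, h]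

lemma foldl_dstep_replicate_mem (m : Nat) (x : Int) (ans : List Int)
    (h : ans.contains x = true) : (List.replicate m x).foldl dstep ans = ans := by
  induction m with
  | zero => simp
  | succ m ih =>
    rw [List.replicate_succ, List.foldl_cons, show dstep ans x = ans by unfold dstep; rw [h]; simp]
    exact ih

lemma foldl_dstep_replicate (n : Nat) (x : Int) (ans : List Int) (hn : 1 ≤ n) :
    (List.replicate n x).foldl dstep ans = dstep ans x := by
  obtain ⟨m, rfl⟩ : ∃ m, n = m + 1 := ⟨n - 1, by omega⟩
  rw [List.replicate_succ, List.foldl_cons]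
  exact foldl_dstep_replicate_mem m x (dstep ans x) (dstep_contains ans x)

lemma foldl_dstep_collapse (pairs : List (Int × Nat)) :
    ∀ (ans : List Int), (∀ p ∈ pairs, 1 ≤ p.2) →
    (pairs.flatMap (fun p => List.replicate p.2 ((p.2 : Nat) : Int))).foldl dstep ans
      = (pairs.map (fun p => ((p.2 : Nat) : Int))).foldl dstep ans := by
  induction pairs with
  | nil => intro ans _; simp
  | cons p ps ih =>
    intro ans hall
    rw [List.flatMap_cons, List.foldl_append, List.map_cons, List.foldl_cons,
      foldl_dstep_replicate _ _ _ (hall p (List.mem_cons_self ..))]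
    exact ih _ (fun q hq => hall q (List.mem_cons_of_mem _ hq))

lemma flush_eq (ans : List Int) (seen : PySem.Set Int) (k : Nat) (hk : 1 ≤ k)
    (hinv : ∀ x : Int, PySem.Set.contains seen x = ans.contains x) :
    (flushRun ans seen (k : Int)).1 = dstep ans (k : Int) ∧
    (∀ x : Int, PySem.Set.contains (flushRun ans seen (k : Int)).2 x
        = (dstep ans (k : Int)).contains x) := by
  have hk0 : (k : Int) ≠ 0 := by omega
  by_cases hmem : ans.contains (k : Int) = true
  · have hc : PySem.Set.contains seen (k : Int) = true := by rw [hinv]; exact hmem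
    have hcond : ¬((k : Int) ≠ 0 ∧ PySem.Set.contains seen (k : Int) = false) := by
      have hm : (k : Int) ∈ seen := by simpa using hc
      simp
      intro _
      exact hm
    rw [flushRun, if_neg hcond, dstep, if_pos hmem]
    exact ⟨rfl, hinv⟩
  · have hc : PySem.Set.contains seen (k : Int) = false := by
      rw [hinv]; exact Bool.eq_false_iff.mpr hmem
    have hcond : ((k : Int) ≠ 0 ∧ PySem.Set.contains seen (k : Int) = false) := ⟨hk0, hc⟩
    rw [flushRun, if_pos hcond, dstep, if_neg hmem]
    refine ⟨rfl, ?_⟩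
    intro x
    have hadd : PySem.Set.add seen (k : Int) = seen ++ [(k : Int)] := by
      show (if PySem.Set.contains seen (k : Int) then seen else seen ++ [(k : Int)]) = _
      rw [hc]
      simp
    show ((PySem.Set.add seen (k : Int)) : List Int).contains x = _
    rw [hadd]
    by_cases hx : x ∈ seen
    · have hx2 : x ∈ ans := by have := hinv x; simp [hx] at this; simpa using this
      simp [hx, hx2]
    · have hx2 : x ∉ ans := by
        have := hinv x
        simp only [List.contains_eq_mem] at this
        intro hmm
        rw [eq_comm] at this
        simp [hmm] at this
        exact hx (by simpa using this)
      simp [hx, hx2]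

lemma loopB_inv (ds : List Int) :
    ∀ (c : Int) (k : Nat) (ans : List Int) (seen : PySem.Set Int), 1 ≤ k →
    (∀ x : Int, PySem.Set.contains seen x = ans.contains x) →
    (flushRun (ds.foldl bStep ((ans, seen), some c, (k : Int))).1.1
              (ds.foldl bStep ((ans, seen), some c, (k : Int))).1.2
              (ds.foldl bStep ((ans, seen), some c, (k : Int))).2.2).1
    = ((grp c k ds).map (fun p => ((p.2 : Nat) : Int))).foldl dstep ans := by
  induction ds with
  | nil =>
    intro c k ans seen hk hinv
    simp only [List.foldl_nil, grp, List.map_cons, List.map_nil, List.foldl_cons, List.foldl_nil]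
    exact (flush_eq ans seen k hk hinv).1
  | cons d ds ih =>
    intro c k ans seen hk hinv
    by_cases h : c < d
    · have hstep : bStep ((ans, seen), some c, (k : Int)) d
          = (flushRun ans seen (k : Int), some d, ((1 : Nat) : Int)) := by
        simp [bStep, h]
      obtain ⟨hfl, hinv'⟩ := flush_eq ans seen k hk hinv
      rw [List.foldl_cons, hstep]
      have := ih d 1 (flushRun ans seen (k : Int)).1 (flushRun ans seen (k : Int)).2 (le_refl 1)
        (by intro x; rw [hinv' x, hfl])
      simp only [grp, if_pos h, List.map_cons, List.foldl_cons]
      simp only [Prod.mk.eta] at this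
      rw [this, hfl]
    · have hstep : bStep ((ans, seen), some c, (k : Int)) d
          = ((ans, seen), some c, ((k + 1 : Nat) : Int)) := by
        simp only [bStep, decide_eq_true_eq]
        rw [if_neg (by simpa using h)]
        norm_num
      rw [List.foldl_cons, hstep]
      have := ih c (k + 1) ans seen (by omega) hinv
      simp only [grp, if_neg h]
      rw [this]

-- ===== VERDICT (by name: the statement is the Claim_ definition above) =====
lemma hA_eq (ps ss : List Int) (hle : ps.length ≤ ss.length)
    (hs : ∀ s ∈ ss.take ps.length, s ≠ 0) (d0 : Int) (rest : List Int)
    (hdays : (ps.zip ss).map ceilDay = d0 :: rest) :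
    solution ps ss
      = (((grp d0 1 rest).map (fun p => ((p.2 : Nat) : Int))).foldl dstep []) := by
  unfold solution
  rw [dayA_eq ps ss hle hs, hdays]
  have h2 := PySem.List.foldl_pyRange_pyGetD (d0 :: rest) (0 : Int)
    (fun (st : List Int × Int) v =>
      (if PySem.List.pyGetD st.1 st.2 0 > v then st.1 ++ [PySem.List.pyGetD st.1 st.2 0]
       else st.1 ++ [v], st.2 + 1))
    ([PySem.List.pyGetD (d0 :: rest) 0 0], 0) (a := 1) (by norm_num)
  simp only [] at h2 ⊢
  rw [h2]
  have hd0 : PySem.List.pyGetD (d0 :: rest) 0 0 = d0 := by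
    simp [PySem.List.pyGetD_zero]
  rw [hd0]
  have hdrop : (d0 :: rest).drop (1 : Int).toNat = rest := by simp
  rw [hdrop]
  rw [loop2_inv rest [d0] d0 (by simp) (by simp) 0 (by simp)]
  have hflat : [d0] ++ tailMax d0 rest = flat (grp d0 1 rest) := by
    have := flat_grp rest d0 1
    simpa using this
  rw [hflat]
  have h3 := PySem.List.foldl_pyRange_zero_pyGetD (flat (grp d0 1 rest)) (0 : Int)
    (fun (ans : List Int) v =>
      if ans.contains ((PySem.List.count (flat (grp d0 1 rest)) v : Nat) : Int) then ans
      else ans ++ [((PySem.List.count (flat (grp d0 1 rest)) v : Nat) : Int)])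
    ([] : List Int)
  simp only [] at h3
  rw [h3]
  have h4 := (List.foldl_map
    (f := fun v => ((PySem.List.count (flat (grp d0 1 rest)) v : Nat) : Int))
    (g := dstep) (l := flat (grp d0 1 rest)) (init := ([] : List Int)))
  simp only [dstep] at h4
  rw [← h4]
  have hcnt : (flat (grp d0 1 rest)).map
      (fun v => ((PySem.List.count (flat (grp d0 1 rest)) v : Nat) : Int))
      = (flat (grp d0 1 rest)).map (fun v => (((flat (grp d0 1 rest)).count v : Nat) : Int)) := by
    simp only [PySem.List.count_eq]
  obtain ⟨hch, _, hpos⟩ := grp_chain rest d0 1 (le_refl 1)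
  rw [hcnt, map_count_flat _ hch, foldl_dstep_collapse _ _ hpos]

lemma hB_eq (ps ss : List Int) (d0 : Int) (rest : List Int)
    (hdays : (ps.zip ss).map ceilDay = d0 :: rest) :
    solution_alt ps ss
      = (((grp d0 1 rest).map (fun p => ((p.2 : Nat) : Int))).foldl dstep []) := by
  unfold solution_alt
  have h := List.foldl_map (f := ceilDay) (g := bStep) (l := ps.zip ss)
    (init := ((([] : List Int), (PySem.Set.empty : PySem.Set Int)), (none : Option Int), (0 : Int)))
  simp only [ceilDay] at h
  simp only [] at h ⊢
  rw [← h, hdays, List.foldl_cons]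
  have hb0 : bStep ((([] : List Int), (PySem.Set.empty : PySem.Set Int)), none, (0 : Int)) d0
      = ((([] : List Int), (PySem.Set.empty : PySem.Set Int)), some d0, (1 : Int)) := by
    simp [bStep, flushRun]
  rw [hb0]
  have hLB := loopB_inv rest d0 1 [] PySem.Set.empty (le_refl 1) (fun x => rfl)
  simp only [Nat.cast_one] at hLB
  exact hLB

-- ===== VERDICT (by name: the statement is the Claim_ definition above) =====
theorem solution_spec : Claim_equal_solution := by
  intro ps ss _ hpre
  obtain ⟨hne, hle, hs⟩ := hpre
  show solution ps ss = solution_alt ps ss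
  have hlen : ((ps.zip ss).map ceilDay).length = ps.length := by
    simp [List.length_zip]
    omega
  have hlen0 : 0 < ((ps.zip ss).map ceilDay).length := by
    rw [hlen]
    exact List.length_pos_iff.mpr hne
  obtain ⟨d0, rest, hdays⟩ : ∃ d0 rest, (ps.zip ss).map ceilDay = d0 :: rest := by
    cases h : (ps.zip ss).map ceilDay with
    | nil => rw [h] at hlen0; simp at hlen0
    | cons a l => exact ⟨a, l, rfl⟩
  rw [hA_eq ps ss hle hs d0 rest hdays, hB_eq ps ss d0 rest hdays]
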